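-- pv_equiv track=rewrite | github.com/rockyrays/cip-kernel-sec | scripts/import_stable.py | add_backports
-- ===== SOURCE A (Python) =====
-- def add_backports(issue_commits, all_backports):
--     try:
--         mainline_commits = issue_commits['mainline']
--     except KeyError:
--         return False
--
--     changed = False
--
--     # Find backports of each commit to each stable branch
--     branch_commits = {}
--     for commit in mainline_commits:
--         try:
--             commit_backports = all_backports[commit]
--         except KeyError:
--             continue
--         for branch_name in commit_backports:
--             branch_commits.setdefault(branch_name, []).append(
--                 commit_backports[branch_name])
--
--     # Only record if all commits have been backported and nothing recorded
--     # for this branch yet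
--     for branch_name in branch_commits:
--         if len(branch_commits[branch_name]) == len(mainline_commits):
--             issue_branch_commits = issue_commits.setdefault(branch_name, [])
--             if not issue_branch_commits:
--                 issue_branch_commits.extend(branch_commits[branch_name])
--                 changed = True
--
--     return changed
-- ===== SOURCE B (Python) =====
-- def add_backports(issue_commits, all_backports):
--     mainline_commits = issue_commits.get('mainline')
--     if mainline_commits is None:
--         return False
--     if not mainline_commits:
--         return False
--
--     # Branches eligible = branches every mainline commit was backported to,
--     # computed as a running set intersection over the commits.
--     eligible = set(all_backports.get(mainline_commits[0], {}))
--     for commit in mainline_commits[1:]: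
--         eligible &= set(all_backports.get(commit, {}))
--
--     changed = False
--     # Every eligible branch is a key of the first commit's backport dict.
--     for branch_name in all_backports.get(mainline_commits[0], {}):
--         if branch_name not in eligible:
--             continue
--         target = issue_commits.setdefault(branch_name, [])
--         if not target:
--             target.extend(all_backports[c][branch_name] for c in mainline_commits)
--             changed = True
--     return changed
-- ===== Notes on version B (the rewrite author's own statement) =====
-- stated objective: alternative
-- what changed: Replaces the per-branch accumulation dict (appending one backport per commit and later comparing each list's length against len(mainline_commits)) by a running set intersection of the commits' backport key-sets; only the surviving branches are then filled in one comprehension per branch.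
import Mathlib
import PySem

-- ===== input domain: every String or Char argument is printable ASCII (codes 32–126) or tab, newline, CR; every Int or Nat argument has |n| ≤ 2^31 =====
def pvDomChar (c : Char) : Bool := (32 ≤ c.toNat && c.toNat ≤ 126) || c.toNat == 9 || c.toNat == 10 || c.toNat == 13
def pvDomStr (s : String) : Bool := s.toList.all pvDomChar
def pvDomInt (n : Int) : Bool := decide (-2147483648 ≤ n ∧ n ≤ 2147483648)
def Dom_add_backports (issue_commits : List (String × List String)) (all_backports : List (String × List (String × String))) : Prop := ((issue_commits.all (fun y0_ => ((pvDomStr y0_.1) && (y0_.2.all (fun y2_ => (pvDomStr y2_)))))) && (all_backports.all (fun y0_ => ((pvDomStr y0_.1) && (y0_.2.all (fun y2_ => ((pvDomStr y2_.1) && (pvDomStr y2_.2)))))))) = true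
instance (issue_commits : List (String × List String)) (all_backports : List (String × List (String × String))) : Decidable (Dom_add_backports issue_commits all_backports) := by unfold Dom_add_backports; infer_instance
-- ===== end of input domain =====

-- B replaces A's per-branch accumulation-and-count by a running set intersection of the
-- commits' backport key-sets (alternative decomposition, same cost).  Both Pythons mutate
-- issue_commits in place; the equivalence proved here is about the RETURN value only.

-- ===== PORT A =====
def add_backports (issue_commits : List (String × List String)) (all_backports : List (String × List (String × String))) : Bool :=
  let ic : PySem.Dict String (List String) := PySem.Dict.mk issue_commits
  let ab : PySem.Dict String (List (String × String)) := PySem.Dict.mk all_backports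
  match ic.get? "mainline" with
  | none => false                         -- except KeyError: return False
  | some mainline_commits =>
    -- branch_commits = {}; for commit in mainline_commits: …
    let branch_commits : PySem.Dict String (List String) :=
      mainline_commits.foldl (fun bc commit =>
        match ab.get? commit with
        | none => bc                      -- except KeyError: continue
        | some cbl =>
          let cb : PySem.Dict String String := PySem.Dict.mk cbl
          -- for branch_name in commit_backports: setdefault(…, []).append(cb[branch_name])
          -- (cb[branch_name] ported with getD; the default kv.2 is unreachable since kv ∈ cb.items)
          cb.items.foldl (fun bc kv =>
            bc.modify kv.1 [] (· ++ [cb.getD kv.1 kv.2])) bc)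
        PySem.Dict.empty
    -- for branch_name in branch_commits: … (Python iterates the dict's keys)
    let res :=
      branch_commits.keys.foldl (fun (st : PySem.Dict String (List String) × Bool) branch_name =>
        if (branch_commits.getD branch_name []).length == mainline_commits.length then
          let ic' := st.1.setdefault branch_name []
          let ibc := ic'.getD branch_name []
          if ibc.isEmpty then
            (ic'.insert branch_name (ibc ++ branch_commits.getD branch_name []), true)
          else (ic', st.2)
        else st) (ic, false)
    res.2

-- ===== PORT B =====
def add_backports_alt (issue_commits : List (String × List String)) (all_backports : List (String × List (String × String))) : Bool :=
  let ic : PySem.Dict String (List String) := PySem.Dict.mk issue_commits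
  let ab : PySem.Dict String (List (String × String)) := PySem.Dict.mk all_backports
  match ic.get? "mainline" with
  | none => false
  | some mainline_commits =>
    match mainline_commits with
    | [] => false
    | c0 :: rest =>
      -- eligible = set(all_backports.get(mainline_commits[0], {})); for c in rest: eligible &= …
      let eligible : PySem.Set String :=
        rest.foldl (fun e c => PySem.Set.inter e (PySem.Dict.mk (ab.getD c [])).keys)
          (PySem.Set.ofList (PySem.Dict.mk (ab.getD c0 [])).keys)
      -- for branch_name in all_backports.get(mainline_commits[0], {}): …
      let res :=
        (PySem.Dict.mk (ab.getD c0 [])).keys.foldl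
          (fun (st : PySem.Dict String (List String) × Bool) branch_name =>
            if eligible.contains branch_name then
              let target_owner := st.1.setdefault branch_name []
              let target := target_owner.getD branch_name []
              if target.isEmpty then
                -- target.extend(all_backports[c][branch_name] for c in mainline_commits)
                -- (ported with filterMap: a miss is unreachable since branch_name is eligible)
                (target_owner.insert branch_name (target ++ (c0 :: rest).filterMap
                    (fun c => (PySem.Dict.mk (ab.getD c [])).get? branch_name)), true)
              else (target_owner, st.2)
            else st) (ic, false)
      res.2

-- ===== PRECONDITION & SPEC =====
-- Pre_ excludes association lists with DUPLICATE keys (in issue_commits, in all_backports, or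
-- inside any per-commit backport dict): such lists do not arise from a Python dict, and on them
-- the first-match list lookup versus Python's last-wins dict collapse makes any behaviour accidental.
def Pre_add_backports (issue_commits : List (String × List String)) (all_backports : List (String × List (String × String))) : Prop :=
  (issue_commits.map Prod.fst).Nodup ∧ (all_backports.map Prod.fst).Nodup ∧
    ∀ p ∈ all_backports, (p.2.map Prod.fst).Nodup
instance (issue_commits : List (String × List String)) (all_backports : List (String × List (String × String))) : Decidable (Pre_add_backports issue_commits all_backports) := by unfold Pre_add_backports; infer_instance
def pvWitness_add_backports : (List (String × List String)) × (List (String × List (String × String))) :=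
  ([("mainline", ["c1", "c2"])],
   [("c1", [("4.19", "d1"), ("5.4", "e1")]), ("c2", [("4.19", "d2")])])
def Spec_add_backports (issue_commits : List (String × List String)) (all_backports : List (String × List (String × String))) (out : Bool) : Prop := out = add_backports_alt issue_commits all_backports
instance (issue_commits : List (String × List String)) (all_backports : List (String × List (String × String))) (out : Bool) : Decidable (Spec_add_backports issue_commits all_backports out) := by unfold Spec_add_backports; infer_instance

-- ===== CLAIM (what is proved, stated in full; the proofs are below) =====
def Claim_equal_add_backports : Prop := ∀ (issue_commits : List (String × List String)) (all_backports : List (String × List (String × String))), Dom_add_backports issue_commits all_backports → Pre_add_backports issue_commits all_backports → Spec_add_backports issue_commits all_backports (add_backports issue_commits all_backports)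

-- ===== LEMMAS AND PROOFS =====

-- The recording loop, generically: its Bool component is an `any` over the traversed keys,
-- testing eligibility and emptiness against the INITIAL issue_commits dict.
theorem pv_loop_snd (cond : String → Bool) (val : String → List String) :
    ∀ (l : List String) (d : PySem.Dict String (List String)) (ch : Bool),
      (l.foldl (fun (st : PySem.Dict String (List String) × Bool) b =>
        if cond b then
          if ((st.1.setdefault b []).getD b []).isEmpty then
            ((st.1.setdefault b []).insert b
              (((st.1.setdefault b []).getD b []) ++ val b), true)
          else (st.1.setdefault b [], st.2)
        else st) (d, ch)).2
      = (ch || l.any fun b => cond b && (d.getD b []).isEmpty) := by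
  intro l
  induction l with
  | nil => intro d ch; simp
  | cons x t ih =>
    intro d ch
    simp only [List.foldl_cons, List.any_cons]
    cases hcb : cond x with
    | false =>
      simp only [Bool.false_eq_true, reduceIte, Bool.false_and, Bool.false_or]
      exact ih d ch
    | true =>
      simp only [reduceIte]
      cases hdc : d.contains x with
      | true =>
        rw [PySem.Dict.setdefault_of_contains d [] hdc]
        cases he : (d.getD x []).isEmpty with
        | false =>
          simp only [Bool.false_eq_true, reduceIte]
          rw [ih d ch]
          simp
        | true =>
          simp only [reduceIte]
          rw [ih _ true]
          simp
      | false =>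
        rw [PySem.Dict.setdefault_of_not_contains d [] hdc,
          PySem.Dict.getD_insert_self]
        simp only [List.isEmpty_nil, reduceIte]
        rw [ih _ true]
        simp [PySem.Dict.getD_of_not_contains d [] hdc]

-- Membership through the running intersection loop.
theorem pv_elig_mem (ab : PySem.Dict String (List (String × String))) :
    ∀ (rest : List String) (e : PySem.Set String) (b : String),
      (b ∈ rest.foldl (fun e c => PySem.Set.inter e (PySem.Dict.mk (ab.getD c [])).keys) e)
      ↔ b ∈ e ∧ ∀ c ∈ rest, b ∈ (PySem.Dict.mk (ab.getD c [])).keys := by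
  intro rest
  induction rest with
  | nil => intro e b; simp
  | cons c t ih =>
    intro e b
    simp only [List.foldl_cons, ih, PySem.Set.mem_inter, List.forall_mem_cons]
    tauto

-- One commit's inner loop, as an append of the matching values.
theorem pv_inner_getD (cb : PySem.Dict String String) (bc : PySem.Dict String (List String))
    (b : String) (h : cb.keys.Nodup) :
    (cb.items.foldl (fun bc kv => bc.modify kv.1 [] (· ++ [cb.getD kv.1 kv.2])) bc).getD b []
      = bc.getD b [] ++ ((cb.items.filter (fun p => p.1 == b)).map (·.2)) := by
  rw [PySem.List.foldl_congr_mem cb.items _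
      (fun bc (kv : String × String) => bc.modify kv.1 [] (· ++ [kv.2])) bc
      (by intro acc kv hkv
          rw [PySem.Dict.getD_of_mem_items cb (by simpa using hkv) h])]
  exact PySem.Dict.getD_foldl_modify_append cb.items bc b

-- Under unique keys, the number of matching items is 0 or 1 by membership.
theorem pv_filter_len (cb : PySem.Dict String String) (b : String) (h : cb.keys.Nodup) :
    ((cb.items.filter (fun p => p.1 == b)).map (·.2)).length
      = if cb.contains b then 1 else 0 := by
  rw [List.length_map, ← List.countP_eq_length_filter]
  have hc : List.countP (fun p => p.1 == b) cb.items = List.count b cb.keys := by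
    rw [show cb.keys = cb.items.map Prod.fst from rfl]
    simp [List.count, List.countP_map, Function.comp_def]
  rw [hc]
  by_cases hb : b ∈ cb.keys
  · rw [List.count_eq_one_of_mem h hb,
      if_pos ((PySem.Dict.contains_iff_mem_keys cb b).mpr hb)]
  · rw [List.count_eq_zero.mpr hb]
    rw [if_neg (by rw [PySem.Dict.contains_iff_mem_keys]; exact hb)]

-- The accumulation fold: each branch's list, read off in closed form.
theorem pv_outer_getD (ab : PySem.Dict String (List (String × String))) :
    ∀ (ml : List String) (bc : PySem.Dict String (List String)) (b : String),
      (∀ c ∈ ml, ((PySem.Dict.mk (ab.getD c [])).keys).Nodup) →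
      (ml.foldl (fun bc commit =>
          match ab.get? commit with
          | none => bc
          | some cbl =>
            (PySem.Dict.mk cbl).items.foldl
              (fun bc kv => bc.modify kv.1 [] (· ++ [(PySem.Dict.mk cbl).getD kv.1 kv.2])) bc)
        bc).getD b []
      = bc.getD b []
        ++ ml.flatMap (fun c =>
             ((PySem.Dict.mk (ab.getD c [])).items.filter (fun p => p.1 == b)).map (·.2)) := by
  intro ml
  induction ml with
  | nil => intro bc b _; simp
  | cons c t ih =>
    intro bc b hN
    simp only [List.foldl_cons, List.flatMap_cons]
    cases h : ab.get? c with
    | none =>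
      rw [ih _ _ (fun c hc => hN c (List.mem_cons_of_mem _ hc))]
      have hk : ab.getD c [] = ([] : List (String × String)) :=
        PySem.Dict.getD_of_get?_eq_none ab [] h
      rw [hk]
      simp
    | some cbl =>
      rw [ih _ _ (fun c hc => hN c (List.mem_cons_of_mem _ hc))]
      have hk : ab.getD c [] = cbl := PySem.Dict.getD_of_get?_eq_some ab [] h
      have hnd : ((PySem.Dict.mk cbl).keys).Nodup := by
        have h0 := hN c List.mem_cons_self
        rwa [hk] at h0
      rw [show (match some cbl with
          | none => bc
          | some cbl =>
            (PySem.Dict.mk cbl).items.foldl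
              (fun bc kv => bc.modify kv.1 [] (· ++ [(PySem.Dict.mk cbl).getD kv.1 kv.2])) bc)
        = (PySem.Dict.mk cbl).items.foldl
            (fun bc kv => bc.modify kv.1 [] (· ++ [(PySem.Dict.mk cbl).getD kv.1 kv.2])) bc from rfl]
      rw [pv_inner_getD (PySem.Dict.mk cbl) bc b hnd, hk, List.append_assoc]

-- The branch list's length counts the commits that have the branch.
theorem pv_bc_len (ab : PySem.Dict String (List (String × String))) (ml : List String) (b : String)
    (hN : ∀ c ∈ ml, ((PySem.Dict.mk (ab.getD c [])).keys).Nodup) :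
    ((ml.foldl (fun bc commit =>
        match ab.get? commit with
        | none => bc
        | some cbl =>
          (PySem.Dict.mk cbl).items.foldl
            (fun bc kv => bc.modify kv.1 [] (· ++ [(PySem.Dict.mk cbl).getD kv.1 kv.2])) bc)
      PySem.Dict.empty).getD b []).length
    = ml.countP (fun c => (PySem.Dict.mk (ab.getD c [])).contains b) := by
  rw [pv_outer_getD ab ml PySem.Dict.empty b hN]
  simp only [PySem.Dict.getD_empty, List.nil_append, List.length_flatMap]
  induction ml with
  | nil => simp
  | cons c t ih =>
    simp only [List.map_cons, List.sum_cons, List.countP_cons,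
      pv_filter_len _ b (hN c (List.mem_cons_self)),
      ih (fun c hc => hN c (List.mem_cons_of_mem _ hc))]
    split <;> omega

-- A key whose branch list is long enough is present in the accumulated dict.
theorem pv_mem_keys_of_getD_len (d : PySem.Dict String (List String)) (b : String) (n : Nat)
    (hn : 0 < n) (h : (d.getD b []).length = n) : b ∈ d.keys := by
  cases hc : d.contains b with
  | true => exact (PySem.Dict.contains_iff_mem_keys d b).mp hc
  | false =>
    rw [PySem.Dict.getD_of_not_contains d [] hc] at h
    simp at h
    omega

-- ===== VERDICT (by name: the statement is the Claim_ definition above) =====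
theorem add_backports_spec : Claim_equal_add_backports := by
  intro icl abl _ hpre
  obtain ⟨-, -, hinner⟩ := hpre
  unfold Spec_add_backports
  simp only [add_backports, add_backports_alt]
  cases hm : (PySem.Dict.mk icl).get? "mainline" with
  | none => rfl
  | some ml =>
    cases ml with
    | nil => rfl
    | cons c0 rest =>
      have hN : ∀ c ∈ (c0 :: rest),
          ((PySem.Dict.mk ((PySem.Dict.mk abl).getD c [])).keys).Nodup := by
        intro c _
        cases h : (PySem.Dict.mk abl).get? c with
        | none =>
          rw [PySem.Dict.getD_of_get?_eq_none _ [] h]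
          exact List.nodup_nil
        | some l =>
          rw [PySem.Dict.getD_of_get?_eq_some _ [] h]
          exact hinner (c, l) (PySem.Dict.mem_items_of_get?_eq_some _ h)
      simp only []
      rw [pv_loop_snd, pv_loop_snd, Bool.false_or, Bool.false_or, Bool.eq_iff_iff]
      simp only [List.any_eq_true, Bool.and_eq_true, beq_iff_eq]
      constructor
      · rintro ⟨b, hbmem, hlen, hemp⟩
        rw [pv_bc_len (PySem.Dict.mk abl) (c0 :: rest) b hN] at hlen
        have hall := List.countP_eq_length.mp hlen
        have hc0 : b ∈ (PySem.Dict.mk ((PySem.Dict.mk abl).getD c0 [])).keys :=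
          (PySem.Dict.contains_iff_mem_keys _ _).mp (hall c0 List.mem_cons_self)
        refine ⟨b, hc0, ?_, hemp⟩
        rw [PySem.Set.contains_iff, pv_elig_mem]
        exact ⟨(PySem.Set.mem_ofList _ _).mpr hc0,
          fun c hc =>
            (PySem.Dict.contains_iff_mem_keys _ _).mp (hall c (List.mem_cons_of_mem _ hc))⟩
      · rintro ⟨b, hbmem, helig, hemp⟩
        rw [PySem.Set.contains_iff, pv_elig_mem] at helig
        have hall : ∀ c ∈ (c0 :: rest),
            (PySem.Dict.mk ((PySem.Dict.mk abl).getD c [])).contains b = true := by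
          intro c hc
          rcases List.mem_cons.mp hc with rfl | hc'
          · exact (PySem.Dict.contains_iff_mem_keys _ _).mpr hbmem
          · exact (PySem.Dict.contains_iff_mem_keys _ _).mpr (helig.2 c hc')
        have hlen := (pv_bc_len (PySem.Dict.mk abl) (c0 :: rest) b hN).trans
          (List.countP_eq_length.mpr hall)
        exact ⟨b, pv_mem_keys_of_getD_len _ b _ (by simp) hlen, hlen, hemp⟩
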